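-- pv_equiv track=rewrite | github.com/Anish932-hash/J.A.R.V.I.S. | core/advanced/advanced_research_engine.py | _identify_research_gaps
-- ===== SOURCE A (Python) =====
-- from typing import Dict, List, Any, Optional, Tuple
--
-- def _identify_research_gaps(results: List[Dict[str, Any]], query: str) -> List[Dict[str, Any]]:
--     """Identify gaps in research coverage"""
--     gaps = []
--
--     # Check for missing perspectives
--     has_academic = any('arxiv' in r.get('source', '').lower() for r in results)
--     has_practical = any('github' in r.get('source', '').lower() for r in results)
--     has_news = any(any(word in r.get('source', '').lower() for word in ['cnn', 'npr']) for r in results)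
--
--     if not has_academic:
--         gaps.append({
--             'type': 'gap',
--             'category': 'academic',
--             'insight': 'Missing academic research perspective',
--             'recommendation': 'Include academic papers in research'
--         })
--
--     if not has_practical:
--         gaps.append({
--             'type': 'gap',
--             'category': 'practical',
--             'insight': 'Missing practical implementation examples',
--             'recommendation': 'Include GitHub repositories and code examples'
--         })
--
--     return gaps
-- ===== SOURCE B (Python) =====
-- from typing import Dict, List, Any
--
-- def _identify_research_gaps(results: List[Dict[str, Any]], query: str) -> List[Dict[str, Any]]:
--     """Identify gaps in research coverage.
--
--     Joins all (lowercased) sources into one newline-separated haystack and runs a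
--     single substring search per perspective on it; correct because neither needle
--     contains a newline, so no match can span a source boundary.
--     """
--     blob = "\n".join(r.get('source', '').lower() for r in results)
--     gaps = []
--     if 'arxiv' not in blob:
--         gaps.append({
--             'type': 'gap',
--             'category': 'academic',
--             'insight': 'Missing academic research perspective',
--             'recommendation': 'Include academic papers in research'
--         })
--     if 'github' not in blob:
--         gaps.append({
--             'type': 'gap',
--             'category': 'practical',
--             'insight': 'Missing practical implementation examples',
--             'recommendation': 'Include GitHub repositories and code examples'
--         })
--     return gaps
-- ===== Notes on version B (the rewrite author's own statement) =====
-- stated objective: alternative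
-- what changed: Instead of per-record any() scans, B concatenates all lowercased sources into one newline-separated haystack and decides each perspective with a single substring test on it (sound since the needles contain no newline, so no match spans a boundary); the unused has_news scan is dropped.
import Mathlib
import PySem

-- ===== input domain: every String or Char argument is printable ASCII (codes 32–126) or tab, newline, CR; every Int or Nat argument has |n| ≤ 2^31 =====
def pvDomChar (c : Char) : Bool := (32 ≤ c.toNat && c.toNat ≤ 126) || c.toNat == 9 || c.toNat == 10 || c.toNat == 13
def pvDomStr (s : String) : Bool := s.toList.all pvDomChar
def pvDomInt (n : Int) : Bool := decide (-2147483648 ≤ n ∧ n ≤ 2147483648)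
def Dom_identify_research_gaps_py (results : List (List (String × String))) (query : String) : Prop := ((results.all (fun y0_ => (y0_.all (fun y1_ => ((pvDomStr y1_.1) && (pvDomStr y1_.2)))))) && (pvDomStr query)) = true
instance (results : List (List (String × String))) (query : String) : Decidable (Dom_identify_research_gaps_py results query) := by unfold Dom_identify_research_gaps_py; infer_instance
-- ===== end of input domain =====

-- B joins all lowercased sources into one newline-separated haystack and runs one substring test per perspective on it (alternative decomposition; the unused has_news scan is dropped).


-- r.get('source', '').lower()  (the same Python expression appears in both programs)
def pvSrc (r : List (String × String)) : String :=
  PySem.Str.lower (PySem.Dict.getD (PySem.Dict.mk r) "source" "")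

-- the two gap dicts (shared literal content of both programs)
def pvAcademicGap : List (String × String) :=
  [("type", "gap"), ("category", "academic"),
   ("insight", "Missing academic research perspective"),
   ("recommendation", "Include academic papers in research")]

def pvPracticalGap : List (String × String) :=
  [("type", "gap"), ("category", "practical"),
   ("insight", "Missing practical implementation examples"),
   ("recommendation", "Include GitHub repositories and code examples")]

-- ===== PORT A =====
def identify_research_gaps_py (results : List (List (String × String))) (query : String) : List (List (String × String)) :=
  let has_academic := results.any (fun r => PySem.Str.isIn "arxiv" (pvSrc r))
  let has_practical := results.any (fun r => PySem.Str.isIn "github" (pvSrc r))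
  let _has_news := results.any (fun r => (["cnn", "npr"]).any (fun word => PySem.Str.isIn word (pvSrc r)))
  (if !has_academic then [pvAcademicGap] else []) ++
  (if !has_practical then [pvPracticalGap] else [])

-- ===== PORT B =====
def identify_research_gaps_py_alt (results : List (List (String × String))) (query : String) : List (List (String × String)) :=
  let blob := PySem.Str.join "\n" (results.map pvSrc)
  (if !(PySem.Str.isIn "arxiv" blob) then [pvAcademicGap] else []) ++
  (if !(PySem.Str.isIn "github" blob) then [pvPracticalGap] else [])

-- ===== PRECONDITION & SPEC =====
def Spec_identify_research_gaps_py (results : List (List (String × String))) (query : String) (out : List (List (String × String))) : Prop := out = identify_research_gaps_py_alt results query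
instance (results : List (List (String × String))) (query : String) (out : List (List (String × String))) : Decidable (Spec_identify_research_gaps_py results query out) := by unfold Spec_identify_research_gaps_py; infer_instance

-- ===== CLAIM (what is proved, stated in full; the proofs are below) =====
def Claim_equal_identify_research_gaps_py : Prop := ∀ (results : List (List (String × String))) (query : String), Dom_identify_research_gaps_py results query → Spec_identify_research_gaps_py results query (identify_research_gaps_py results query)

-- ===== LEMMAS AND PROOFS =====

-- a substring search in a haystack split by a character absent from the needle
-- decomposes into searches of the two halves
theorem pv_isIn_append_cons (n a b : List Char) (c : Char) (hc : c ∉ n) :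
    PySem.Chars.isIn n (a ++ c :: b) = (PySem.Chars.isIn n a || PySem.Chars.isIn n b) := by
  rw [Bool.eq_iff_iff, Bool.or_eq_true]
  constructor
  · intro h
    obtain ⟨j, hp⟩ := (PySem.Chars.exists_prefix_drop_iff_isIn n (a ++ c :: b)).mpr h
    by_cases hj : j ≤ a.length
    · rw [List.drop_append_of_le_length hj] at hp
      by_cases hl : n.length ≤ (a.drop j).length
      · left
        refine (PySem.Chars.exists_prefix_drop_iff_isIn n a).mp ⟨j, ?_⟩
        have he := List.prefix_iff_eq_take.mp hp
        rw [List.take_append_of_le_length hl] at he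
        have h3 := List.take_prefix n.length (a.drop j)
        rwa [← he] at h3
      · exfalso
        apply hc
        have hi : (a.drop j).length < n.length := by omega
        have h2 := List.IsPrefix.getElem hp hi
        rw [List.getElem_append_right (le_refl _)] at h2
        simp at h2
        exact h2 ▸ List.getElem_mem _
    · right
      refine (PySem.Chars.exists_prefix_drop_iff_isIn n b).mp ⟨j - (a.length + 1), ?_⟩
      have he : (a ++ c :: b).drop j = b.drop (j - (a.length + 1)) := by
        have : a ++ c :: b = (a ++ [c]) ++ b := by simp
        rw [this, List.drop_append, List.drop_of_length_le (by simp; omega)]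
        simp
      rwa [he] at hp
  · rintro (h | h)
    · have hinf : n <:+: a := (PySem.Chars.isIn_iff_infix n a).mp h
      exact (PySem.Chars.isIn_iff_infix n _).mpr (hinf.trans ⟨[], c :: b, by simp⟩)
    · have hinf : n <:+: b := (PySem.Chars.isIn_iff_infix n b).mp h
      exact (PySem.Chars.isIn_iff_infix n _).mpr (hinf.trans ⟨a ++ [c], [], by simp⟩)

-- searching the joined haystack = searching each piece, when the needle avoids the separator
theorem pv_isIn_join (n : List Char) (c : Char) (hn : n ≠ []) (hc : c ∉ n) :
    ∀ l : List (List Char),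
      PySem.Chars.isIn n (PySem.Chars.join [c] l) = l.any (fun s => PySem.Chars.isIn n s)
  | [] => by
      simp only [PySem.Chars.join_nil, List.any_nil]
      rw [PySem.Chars.isIn_eq_false_iff]
      rintro ⟨s, t, h⟩
      rcases List.append_eq_nil_iff.mp h with ⟨h1, -⟩
      exact hn (List.append_eq_nil_iff.mp h1).2
  | [x] => by simp [PySem.Chars.join_singleton]
  | x :: y :: l => by
      rw [PySem.Chars.join_cons_cons]
      have h1 : x ++ [c] ++ PySem.Chars.join [c] (y :: l)
          = x ++ c :: PySem.Chars.join [c] (y :: l) := by simp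
      rw [h1, pv_isIn_append_cons n x _ c hc, pv_isIn_join n c hn hc (y :: l)]
      simp

-- B's joined-haystack test agrees with A's per-record any() scan
theorem pv_blob_scan (needle : String) (hn : needle.toList ≠ []) (hc : '\n' ∉ needle.toList)
    (results : List (List (String × String))) :
    PySem.Str.isIn needle (PySem.Str.join "\n" (results.map pvSrc))
      = results.any (fun r => PySem.Str.isIn needle (pvSrc r)) := by
  simp only [PySem.Str.isIn_eq, PySem.Str.toList_join]
  have : ("\n" : String).toList = ['\n'] := rfl
  rw [this, List.map_map, pv_isIn_join needle.toList '\n' hn hc]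
  simp [List.any_map, Function.comp_def]

-- ===== VERDICT (by name: the statement is the Claim_ definition above) =====
theorem identify_research_gaps_py_spec : Claim_equal_identify_research_gaps_py := by
  intro results query _
  unfold Spec_identify_research_gaps_py identify_research_gaps_py identify_research_gaps_py_alt
  simp only [pv_blob_scan "arxiv" (by decide) (by decide) results,
      pv_blob_scan "github" (by decide) (by decide) results]
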